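-- pv_equiv track=rewrite | github.com/fredboudon/lpy | src/openalea/lpy/gui/objectpanelcommon.py | retrievebasename
-- ===== SOURCE A (Python) =====
-- def retrievebasename(name):
--     name = str(name)
--     lastindex = len(name)-1
--     i = lastindex
--     while i >= 0 and name[i].isdigit():
--         i -= 1
--     if i == lastindex or i <= 0:
--         return name
--     if name[i] == '_' and i >= 1:
--         return name[:i]
--     return name
-- ===== SOURCE B (Python) =====
-- def retrievebasename(name):
--     name = str(name)
--     stem, sep, suffix = name.rpartition('_')
--     if sep and stem and suffix and suffix.isdigit():
--         return stem
--     return name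
-- ===== Notes on version B (the rewrite author's own statement) =====
-- stated objective: alternative
-- what changed: Instead of A's backward index loop that strips trailing digits and then inspects the character at the stop position, B splits the name at the LAST underscore with str.rpartition and returns the stem when the suffix after it is a nonempty run of digits and the stem is nonempty.
import Mathlib
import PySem

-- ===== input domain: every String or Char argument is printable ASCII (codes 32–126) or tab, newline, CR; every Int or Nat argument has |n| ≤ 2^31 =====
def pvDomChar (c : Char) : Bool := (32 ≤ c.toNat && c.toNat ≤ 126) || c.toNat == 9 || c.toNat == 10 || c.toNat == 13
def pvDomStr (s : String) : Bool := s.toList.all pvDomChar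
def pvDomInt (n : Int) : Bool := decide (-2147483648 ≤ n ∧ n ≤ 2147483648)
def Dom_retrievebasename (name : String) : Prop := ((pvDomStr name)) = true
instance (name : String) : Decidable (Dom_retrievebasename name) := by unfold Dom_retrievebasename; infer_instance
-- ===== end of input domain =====

-- B replaces A's backward digit-stripping index loop by a split at the LAST '_'
-- (rpartition) plus an isdigit test on the suffix; same O(n) cost, plainer code.

-- ===== PORT A =====
-- the 'while i >= 0 and name[i].isdigit(): i -= 1' loop of A
def pvAwhile (cs : List Char) (i : Int) : Int :=
  if h : 0 ≤ i ∧ ((PySem.List.pyGet? cs i).any PySem.Chars.isdigit) = true then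
    pvAwhile cs (i - 1)
  else i
termination_by (i + 1).toNat
decreasing_by omega

def retrievebasename (name : String) : String :=
  let cs := name.toList
  let lastindex : Int := (cs.length : Int) - 1
  let i := pvAwhile cs lastindex
  if i = lastindex ∨ i ≤ 0 then name
  else if PySem.List.pyGet? cs i = some '_' ∧ 1 ≤ i then
    String.mk (PySem.List.slice cs none (some i))
  else name

-- ===== PORT B =====
def retrievebasename_alt (name : String) : String :=
  let cs := name.toList
  -- name.rpartition('_') for the one-char separator '_': scan from the right to
  -- the last '_' (exact); suffix = chars after it (reversed here), stem = chars before it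
  let sufRev := cs.reverse.takeWhile (fun c => c ≠ '_')
  match cs.reverse.dropWhile (fun c => c ≠ '_') with
  | [] => name                      -- sep == '' : no '_' in name
  | _ :: stemRev =>
      -- 'if sep and stem and suffix and suffix.isdigit()'; str.isdigit =
      -- nonempty ∧ every char a digit (exact on the ASCII domain)
      if stemRev ≠ [] ∧ sufRev ≠ [] ∧ sufRev.all PySem.Chars.isdigit = true then
        String.mk stemRev.reverse   -- stem
      else name

-- ===== PRECONDITION & SPEC =====
def Spec_retrievebasename (name : String) (out : String) : Prop := out = retrievebasename_alt name
instance (name : String) (out : String) : Decidable (Spec_retrievebasename name out) := by unfold Spec_retrievebasename; infer_instance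

-- ===== CLAIM (what is proved, stated in full; the proofs are below) =====
def Claim_equal_retrievebasename : Prop := ∀ (name : String), Dom_retrievebasename name → Spec_retrievebasename name (retrievebasename name)

-- ===== LEMMAS AND PROOFS =====

-- takeWhile/dropWhile across an append whose first part wholly satisfies p
lemma pv_tw_app {p : Char → Bool} (l₁ l₂ : List Char) (h : ∀ c ∈ l₁, p c = true) :
    (l₁ ++ l₂).takeWhile p = l₁ ++ l₂.takeWhile p := by
  induction l₁ with
  | nil => simp
  | cons a l ih =>
    simp [h a (by simp), ih (fun c hc => h c (by simp [hc]))]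
lemma pv_dw_app {p : Char → Bool} (l₁ l₂ : List Char) (h : ∀ c ∈ l₁, p c = true) :
    (l₁ ++ l₂).dropWhile p = l₂.dropWhile p := by
  induction l₁ with
  | nil => simp
  | cons a l ih =>
    simp only [List.cons_append, List.dropWhile_cons, h a (by simp)]
    exact ih (fun c hc => h c (by simp [hc]))

-- a digit is never an underscore
lemma pv_dig_ne (c : Char) (h : PySem.Chars.isdigit c = true) : c ≠ '_' := by
  rintro rfl; exact absurd h (by decide)

-- pyGet? only returns members
lemma pv_pyGet?_mem (xs : List Char) (i : Int) (c : Char)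
    (h : PySem.List.pyGet? xs i = some c) : c ∈ xs := by
  simp only [PySem.List.pyGet?] at h
  cases hx : PySem.List.pyIdx? xs.length i with
  | none => rw [hx] at h; simp at h
  | some j =>
    rw [hx] at h
    simp only [Option.bind_some] at h
    exact List.mem_of_getElem? h

-- characterization of A's while loop: it lands just left of the block of trailing digits
lemma pv_awhile_spec (cs : List Char) (n : Nat) (hn : n ≤ cs.length) :
    pvAwhile cs ((n : Int) - 1)
      = (n : Int) - 1 - (((cs.take n).reverse.takeWhile PySem.Chars.isdigit).length : Int) := by
  induction n with
  | zero =>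
    rw [pvAwhile]
    simp
  | succ m ih =>
    have hm : m < cs.length := by omega
    have hget : PySem.List.pyGet? cs ((m : Int) + 1 - 1) = some cs[m] := by
      have : (m : Int) + 1 - 1 = (m : Int) := by ring
      rw [this, PySem.List.pyGet?_natCast, List.getElem?_eq_getElem hm]
    have htake : (cs.take (m + 1)).reverse = cs[m] :: (cs.take m).reverse := by
      rw [List.take_succ, List.getElem?_eq_getElem hm]
      simp
    rw [pvAwhile]
    push_cast
    by_cases hd : PySem.Chars.isdigit cs[m] = true
    · rw [dif_pos]
      · have h1 : (m : Int) + 1 - 1 - 1 = (m : Int) - 1 := by ring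
        rw [h1, ih (by omega), htake, List.takeWhile_cons_of_pos hd]
        simp only [List.length_cons]
        push_cast
        omega
      · constructor
        · omega
        · rw [hget]
          simpa using hd
    · rw [dif_neg]
      · rw [htake, List.takeWhile_cons_of_neg (by simpa using hd)]
        simp
      · rintro ⟨-, hAny⟩
        rw [hget] at hAny
        simp only [Option.any_some] at hAny
        exact hd hAny

theorem retrievebasename_spec : Claim_equal_retrievebasename := by
  intro name _
  unfold Spec_retrievebasename retrievebasename retrievebasename_alt
  dsimp only
  set cs := name.toList with hcs
  set D := PySem.Chars.isdigit with hD
  set t := (cs.reverse.takeWhile D).length with ht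
  set s := (cs.reverse.dropWhile D).reverse with hs
  -- decomposition of cs: stem-with-underscore part s, then the trailing digit block
  have hdecomp : cs = s ++ (cs.reverse.takeWhile D).reverse := by
    conv_lhs => rw [← cs.reverse_reverse]
    conv_lhs => rw [← List.takeWhile_append_dropWhile (p := D) (l := cs.reverse)]
    rw [List.reverse_append]
  have hrdecomp : cs.reverse = cs.reverse.takeWhile D ++ s.reverse := by
    conv_lhs => rw [hdecomp]
    simp [hs]
  have hlen : s.length + t = cs.length := by
    conv_rhs => rw [hdecomp]
    simp [ht, hs]
  have hi : pvAwhile cs ((cs.length : Int) - 1) = (cs.length : Int) - 1 - (t : Int) := by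
    have := pv_awhile_spec cs cs.length (le_refl _)
    rwa [List.take_length] at this
  rw [hi]
  have htdig : ∀ c ∈ cs.reverse.takeWhile D, D c = true := fun c hc => List.mem_takeWhile_imp hc
  cases hM : cs.reverse.dropWhile (fun c => decide (c ≠ '_')) with
  | nil =>
    -- no '_' in name at all: both sides return name
    have hall : ∀ c ∈ cs, c ≠ '_' := by
      intro c hc
      have := (List.dropWhile_eq_nil_iff).mp hM c (by simpa using hc)
      simpa using this
    split_ifs with h1 h2
    · rfl
    · exact absurd (hall _ (pv_pyGet?_mem _ _ _ h2.1)) (by simp)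
    · rfl
  | cons u stemRev =>
    have hne : cs.reverse.dropWhile (fun c => decide (c ≠ '_')) ≠ [] := by rw [hM]; simp
    have hu : u = '_' := by
      have h0 : (cs.reverse.dropWhile (fun c => decide (c ≠ '_'))).head? = some u := by
        rw [hM]; rfl
      have h1 := List.head?_eq_some_head hne
      rw [h0] at h1
      injection h1 with h3
      have h2 := List.head_dropWhile_not (fun c => decide (c ≠ '_')) hne
      rw [← h3] at h2
      simpa using h2
    subst hu
    dsimp only
    have hsplitr : cs.reverse = cs.reverse.takeWhile (fun c => decide (c ≠ '_')) ++ '_' :: stemRev := by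
      conv_lhs => rw [← List.takeWhile_append_dropWhile (p := fun c => decide (c ≠ '_')) (l := cs.reverse)]
      rw [hM]
    by_cases hC : stemRev ≠ [] ∧ cs.reverse.takeWhile (fun c => decide (c ≠ '_')) ≠ [] ∧
        (cs.reverse.takeWhile (fun c => decide (c ≠ '_'))).all D = true
    · -- the strip case on both sides
      obtain ⟨hstem, hsuf, hsufd⟩ := hC
      set sufRev := cs.reverse.takeWhile (fun c => decide (c ≠ '_')) with hsufRev
      have hsufd' : ∀ c ∈ sufRev, D c = true := fun c hc => by
        have := List.all_eq_true.mp hsufd c hc; simpa using this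
      -- identify t and s
      have htw : cs.reverse.takeWhile D = sufRev := by
        rw [hsplitr, pv_tw_app _ _ hsufd']
        have : List.takeWhile D ('_' :: stemRev) = [] := by
          rw [List.takeWhile_cons_of_neg]; rw [hD]; decide
        rw [this, List.append_nil]
      have hdw : cs.reverse.dropWhile D = '_' :: stemRev := by
        rw [hsplitr, pv_dw_app _ _ hsufd', List.dropWhile_cons_of_neg]
        rw [hD]; decide
      have hts : t = sufRev.length := by rw [ht, htw]
      have hss : s = stemRev.reverse ++ ['_'] := by rw [hs, hdw]; simp
      have ht1 : 1 ≤ t := by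
        have h1 : 0 < sufRev.length := List.length_pos_iff.mpr hsuf
        omega
      have hs2 : 2 ≤ s.length := by
        have h1 : 0 < stemRev.length := List.length_pos_iff.mpr hstem
        rw [hss]
        simp
        omega
      have hiv : (cs.length : Int) - 1 - (t : Int) = ((s.length - 1 : Nat) : Int) := by omega
      have hk : s.length - 1 < s.length := by omega
      have hget : PySem.List.pyGet? cs ((cs.length : Int) - 1 - (t : Int)) = some s[s.length - 1] := by
        rw [hiv, PySem.List.pyGet?_natCast]
        conv_lhs => rw [hdecomp]
        rw [List.getElem?_append_left hk, List.getElem?_eq_getElem hk]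
      have hlastu : s[s.length - 1] = '_' := by
        have h1 : s.getLast? = some '_' := by
          rw [hss]; simp
        rw [List.getLast?_eq_getElem?, List.getElem?_eq_getElem hk] at h1
        injection h1
      rw [if_neg (by omega), if_pos ⟨by rw [hget, hlastu], by omega⟩,
          if_pos ⟨hstem, hsuf, hsufd⟩]
      -- both slices are the stem
      have hA : PySem.List.slice cs none (some ((cs.length : Int) - 1 - (t : Int)))
          = s.dropLast := by
        rw [hiv, PySem.List.slice_to _ (Int.natCast_nonneg _), Int.toNat_natCast]
        conv_lhs => rw [hdecomp]
        rw [List.take_append_of_le_length (by omega), List.dropLast_eq_take]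
      rw [hA, hss, List.dropLast_concat]
    · -- no strip on either side: show A's strip branch is unreachable
      rw [if_neg hC]
      split_ifs with h1 h2
      · rfl
      · exfalso
        obtain ⟨hund, hi1⟩ := h2
        rw [not_or, not_le] at h1
        obtain ⟨h1a, h1b⟩ := h1
        have ht1 : 1 ≤ t := by omega
        have hs2 : 2 ≤ s.length := by omega
        have hiv : (cs.length : Int) - 1 - (t : Int) = ((s.length - 1 : Nat) : Int) := by omega
        have hk : s.length - 1 < s.length := by omega
        have hget : PySem.List.pyGet? cs ((cs.length : Int) - 1 - (t : Int)) = some s[s.length - 1] := by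
          rw [hiv, PySem.List.pyGet?_natCast]
          conv_lhs => rw [hdecomp]
          rw [List.getElem?_append_left hk, List.getElem?_eq_getElem hk]
        have hlast : s.getLast? = some '_' := by
          rw [List.getLast?_eq_getElem?, List.getElem?_eq_getElem hk]
          rw [hget] at hund
          injection hund with h; rw [h]
        -- s.reverse starts with '_'
        obtain ⟨rest, hrev⟩ : ∃ rest, s.reverse = '_' :: rest := by
          have : s.reverse.head? = some '_' := by rw [List.head?_reverse, hlast]
          cases hx : s.reverse with
          | nil => rw [hx] at this; exact absurd this (by simp)
          | cons a l =>
            rw [hx] at this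
            exact ⟨l, by simp at this; rw [this]⟩
        -- compute B's takeWhile/dropWhile on the underscore predicate
        have htdig' : ∀ c ∈ cs.reverse.takeWhile D, (fun c => decide (c ≠ '_')) c = true := by
          intro c hc; simpa using pv_dig_ne c (htdig c hc)
        have htwu : cs.reverse.takeWhile (fun c => decide (c ≠ '_')) = cs.reverse.takeWhile D := by
          conv_lhs => rw [hrdecomp]
          rw [pv_tw_app _ _ htdig', hrev, List.takeWhile_cons_of_neg (by simp), List.append_nil]
        have hdwu : cs.reverse.dropWhile (fun c => decide (c ≠ '_')) = '_' :: rest := by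
          conv_lhs => rw [hrdecomp]
          rw [pv_dw_app _ _ htdig', hrev, List.dropWhile_cons_of_neg (by simp)]
        rw [hM] at hdwu
        have hrest : stemRev = rest := by injection hdwu
        have hrl : rest.length = s.length - 1 := by
          have := congrArg List.length hrev
          simp at this; omega
        apply hC
        refine ⟨?_, ?_, ?_⟩
        · rw [hrest]; intro hx; rw [hx] at hrl; simp at hrl; omega
        · rw [htwu]; intro hx; rw [hx] at ht; simp at ht; omega
        · rw [htwu, List.all_eq_true]; exact htdig
      · rfl
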